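-- pv_equiv track=rewrite | github.com/LittleViewer/gFDMTP | core/coreUtilsClass.py | string_formated_name_file
-- ===== SOURCE A (Python) =====
-- def string_formated_name_file(string, unformated_sign = [".", ",",",","'",";", "?", "!",":","-", " ", "/"]):
--     string_formated = ""
--     for one_sign in string:
--         if one_sign in unformated_sign:
--             string_formated = string_formated + "_"
--         else:
--             string_formated = string_formated + one_sign
--     return string_formated
-- ===== SOURCE B (Python) =====
-- def string_formated_name_file(string, unformated_sign = [".", ",",",","'",";", "?", "!",":","-", " ", "/"]):
--     # Only single-character entries can ever match a character of `string`;
--     # build a translation table from them and do one C-level pass.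
--     table = str.maketrans({s: "_" for s in unformated_sign if len(s) == 1})
--     return string.translate(table)
-- ===== Notes on version B (the rewrite author's own statement) =====
-- stated objective: idiomatic
-- what changed: Replaces the per-character loop with list-membership test and repeated string concatenation by a str.maketrans translation table (built once from the single-character signs) and a single string.translate pass.
import Mathlib
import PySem

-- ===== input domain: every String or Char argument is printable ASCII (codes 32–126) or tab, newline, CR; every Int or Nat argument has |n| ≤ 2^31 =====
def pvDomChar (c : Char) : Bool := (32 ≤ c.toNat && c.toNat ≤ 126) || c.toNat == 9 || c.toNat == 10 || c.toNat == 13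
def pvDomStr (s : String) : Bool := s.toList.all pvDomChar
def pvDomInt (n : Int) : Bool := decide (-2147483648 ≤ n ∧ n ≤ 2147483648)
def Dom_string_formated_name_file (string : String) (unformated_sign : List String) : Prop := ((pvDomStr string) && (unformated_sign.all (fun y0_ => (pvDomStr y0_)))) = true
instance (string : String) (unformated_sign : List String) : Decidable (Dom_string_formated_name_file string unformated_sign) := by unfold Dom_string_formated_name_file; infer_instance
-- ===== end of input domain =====

-- B replaces A's per-character loop (membership test + string concatenation) by a
-- translation table built once from the single-character signs and one translate pass.

-- ===== PORT A =====
-- A: accumulate a string char by char; iterating a Python string yields one-char strings,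
-- so the membership test compares the one-char string against the sign list.
def string_formated_name_file (string : String) (unformated_sign : List String) : String :=
  String.ofList (string.toList.foldl
    (fun string_formated one_sign =>
      if unformated_sign.contains (String.ofList [one_sign])
      then string_formated ++ ['_']
      else string_formated ++ [one_sign]) [])

-- ===== PORT B =====
-- B: table = str.maketrans({s: "_" for s in unformated_sign if len(s) == 1});
-- the dict comprehension is the foldl of inserts, translate is one map with table lookup
-- (a char absent from the table maps to itself, as string.translate does).
def string_formated_name_file_alt (string : String) (unformated_sign : List String) : String :=
  let table : PySem.Dict Char Char :=
    (unformated_sign.filter (fun s => s.toList.length == 1)).foldl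
      (fun d s => d.insert (s.toList.headD ' ') '_') PySem.Dict.empty
  String.ofList (string.toList.map (fun c => table.getD c c))

-- ===== PRECONDITION & SPEC =====
def Spec_string_formated_name_file (string : String) (unformated_sign : List String) (out : String) : Prop := out = string_formated_name_file_alt string unformated_sign
instance (string : String) (unformated_sign : List String) (out : String) : Decidable (Spec_string_formated_name_file string unformated_sign out) := by unfold Spec_string_formated_name_file; infer_instance

-- ===== CLAIM (what is proved, stated in full; the proofs are below) =====
def Claim_equal_string_formated_name_file : Prop := ∀ (string : String) (unformated_sign : List String), Dom_string_formated_name_file string unformated_sign → Spec_string_formated_name_file string unformated_sign (string_formated_name_file string unformated_sign)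

-- ===== LEMMAS AND PROOFS =====

-- Looking up any char in the table built by B's insert loop: '_' if the char is a key, else the default.
theorem getD_foldl_insert_underscore (l : List String) (d : PySem.Dict Char Char) (c : Char) :
    (l.foldl (fun d s => d.insert (s.toList.headD ' ') '_') d).getD c c
      = if c ∈ l.map (fun s => s.toList.headD ' ') then '_' else d.getD c c := by
  induction l generalizing d with
  | nil => simp
  | cons s t ih =>
      simp only [List.foldl_cons, List.map_cons, List.mem_cons, ih,
        PySem.Dict.getD_insert]
      by_cases h1 : c ∈ List.map (fun s => s.toList.headD ' ') t
      · rw [if_pos h1, if_pos (Or.inr h1)]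
      · by_cases h2 : c = s.toList.headD ' '
        · rw [if_neg h1, if_pos h2, if_pos (Or.inl h2)]
        · rw [if_neg h1, if_neg h2, if_neg (by tauto)]

-- A's membership test agrees with membership among B's table keys.
theorem contains_iff_key (unformated_sign : List String) (c : Char) :
    String.ofList [c] ∈ unformated_sign
      ↔ c ∈ (unformated_sign.filter (fun s => s.toList.length == 1)).map
          (fun s => s.toList.headD ' ') := by
  simp only [List.mem_map, List.mem_filter]
  constructor
  · intro h
    exact ⟨String.ofList [c], ⟨h, by simp⟩, by simp⟩
  · rintro ⟨s, ⟨hs, hlen⟩, hhead⟩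
    have : s.toList = [c] := by
      rcases hl : s.toList with _ | ⟨a, _ | ⟨b, t⟩⟩ <;> simp [hl] at hlen ⊢
      simpa [hl] using hhead
    have hs2 : s = String.ofList [c] := by
      calc s = String.ofList s.toList := String.ofList_toList.symm
        _ = String.ofList [c] := by rw [this]
    exact hs2 ▸ hs

-- ===== VERDICT (by name: the statement is the Claim_ definition above) =====
theorem string_formated_name_file_spec : Claim_equal_string_formated_name_file := by
  intro string unformated_sign _
  unfold Spec_string_formated_name_file string_formated_name_file string_formated_name_file_alt
  congr 1
  have hbody : (fun (acc : List Char) (one_sign : Char) =>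
        if unformated_sign.contains (String.ofList [one_sign]) = true
        then acc ++ ['_'] else acc ++ [one_sign])
      = fun acc one_sign => acc ++
          [if unformated_sign.contains (String.ofList [one_sign]) = true
           then '_' else one_sign] := by
    funext acc c; split_ifs <;> rfl
  rw [hbody, PySem.List.foldl_append_singleton_eq_map]
  refine List.map_congr_left ?_
  intro c _
  rw [getD_foldl_insert_underscore]
  have hiff := contains_iff_key unformated_sign c
  by_cases h : c ∈ (unformated_sign.filter (fun s => s.toList.length == 1)).map
      (fun s => s.toList.headD ' ')
  · have hc : unformated_sign.contains (String.ofList [c]) = true := by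
      simpa [List.contains_iff_mem] using hiff.2 h
    rw [if_pos hc, if_pos h]
  · have hc : ¬ unformated_sign.contains (String.ofList [c]) = true := by
      simp only [List.contains_iff_mem]
      exact mt hiff.1 h
    rw [if_neg hc, if_neg h, PySem.Dict.getD_empty]
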